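-- pv_equiv track=rewrite | github.com/ssh10032/Programmers | 프로그래머스/0/181860. 빈 배열에 추가， 삭제하기/빈 배열에 추가， 삭제하기.py | solution
-- ===== SOURCE A (Python) =====
-- def solution(arr, flag):
--     answer = []
--     for i, j in zip(arr, flag):
--         if j :
--             answer += [i] *i*2
--         else:
--             answer = answer[:-i]
--     return answer
-- ===== SOURCE B (Python) =====
-- def solution(arr, flag):
--     # Run-length segment stack: push (value, count) runs, trim counts on delete,
--     # materialize the flat list once at the end.
--     segs = []   # stack of (value, count) runs, count > 0; top of stack at the end
--     total = 0   # current flat length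
--     for v, f in zip(arr, flag):
--         if f:
--             n = 2 * v
--             if n > 0:
--                 segs.append((v, n))
--                 total += n
--         else:
--             # length kept by answer[:-v] (Python slice rule, incl. v <= 0)
--             keep = max(total - v, 0) if v > 0 else min(-v, total)
--             while total > keep:
--                 val, cnt = segs[-1]
--                 drop = min(cnt, total - keep)
--                 if drop == cnt:
--                     segs.pop()
--                 else:
--                     segs[-1] = (val, cnt - drop)
--                 total -= drop
--     out = []
--     for val, cnt in segs:
--         out.extend([val] * cnt)
--     return out
-- ===== Notes on version B (the rewrite author's own statement) =====
-- stated objective: faster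
-- what changed: Replaces repeated list concatenation/slicing of the flat answer by a run-length segment stack ((value,count) runs) whose counts are trimmed on deletes, materializing the flat list once at the end.
import Mathlib
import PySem

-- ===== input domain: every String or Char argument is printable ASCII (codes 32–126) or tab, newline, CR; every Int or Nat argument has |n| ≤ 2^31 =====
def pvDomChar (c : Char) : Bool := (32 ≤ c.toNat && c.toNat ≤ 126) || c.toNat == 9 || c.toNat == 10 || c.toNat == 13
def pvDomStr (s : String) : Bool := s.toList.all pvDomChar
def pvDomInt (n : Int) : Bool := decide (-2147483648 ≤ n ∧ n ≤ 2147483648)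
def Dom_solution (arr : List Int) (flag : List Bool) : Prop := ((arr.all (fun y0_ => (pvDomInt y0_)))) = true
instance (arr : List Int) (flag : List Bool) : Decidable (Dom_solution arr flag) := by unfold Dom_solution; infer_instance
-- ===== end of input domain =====

-- B replaces A's repeated flat-list concatenation/slicing by a run-length segment stack
-- ((value,count) runs, counts trimmed on delete), materialized once at the end (faster).
-- ===== PORT A =====
def solution (arr : List Int) (flag : List Bool) : List Int :=
  (arr.zip flag).foldl
    (fun answer p =>
      if p.2 then
        -- answer += [i] * i * 2
        answer ++ PySem.List.pyRepeat (PySem.List.pyRepeat [p.1] p.1) 2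
      else
        -- answer = answer[:-i]
        PySem.List.slice answer none (some (-p.1)))
    []

-- ===== PORT B =====
-- stack of (value, count) runs; HEAD of the list is the TOP of Source B's stack (Python's end)
-- the inner while loop of Source B: drop `d` elements' worth of counts from the top of the stack
def popDrop : List (Int × Nat) → Nat → List (Int × Nat)
  | segs, 0 => segs
  | [], _ + 1 => []
  | (v, c) :: rest, d + 1 =>
      if c ≤ d + 1 then popDrop rest (d + 1 - c) else (v, c - (d + 1)) :: rest

-- one iteration of Source B's main loop on the state (segs, total)
def altStep (st : List (Int × Nat) × Nat) (p : Int × Bool) : List (Int × Nat) × Nat :=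
  if p.2 then
    let n := 2 * p.1
    if 0 < n then ((p.1, n.toNat) :: st.1, st.2 + n.toNat) else st
  else
    let keep : Nat := if 0 < p.1 then st.2 - p.1.toNat else min (-p.1).toNat st.2
    (popDrop st.1 (st.2 - keep), keep)

def solution_alt (arr : List Int) (flag : List Bool) : List Int :=
  -- materialize: Source B iterates the stack bottom-to-top, i.e. the reversed Lean list
  ((arr.zip flag).foldl altStep ([], 0)).1.reverse.foldl
    (fun out p => out ++ List.replicate p.2 p.1) []

-- ===== PRECONDITION & SPEC =====
def Spec_solution (arr : List Int) (flag : List Bool) (out : List Int) : Prop := out = solution_alt arr flag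
instance (arr : List Int) (flag : List Bool) (out : List Int) : Decidable (Spec_solution arr flag out) := by unfold Spec_solution; infer_instance

-- ===== CLAIM (what is proved, stated in full; the proofs are below) =====
def Claim_equal_solution : Prop := ∀ (arr : List Int) (flag : List Bool), Dom_solution arr flag → Spec_solution arr flag (solution arr flag)

-- ===== LEMMAS AND PROOFS =====

-- the flat list a segment stack represents (bottom-to-top = reversed Lean list)
def flatten (segs : List (Int × Nat)) : List Int :=
  segs.reverse.flatMap (fun p => List.replicate p.2 p.1)

theorem flatten_cons (v : Int) (c : Nat) (rest : List (Int × Nat)) :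
    flatten ((v, c) :: rest) = flatten rest ++ List.replicate c v := by
  simp [flatten]

-- Source B's while loop drops exactly d trailing elements of the represented list
theorem popDrop_flatten (segs : List (Int × Nat)) : ∀ d : Nat,
    flatten (popDrop segs d) = (flatten segs).take ((flatten segs).length - d) := by
  induction segs with
  | nil => intro d; cases d <;> simp [popDrop, flatten]
  | cons p rest ih =>
    intro d
    obtain ⟨v, c⟩ := p
    cases d with
    | zero => simp [popDrop]
    | succ d =>
      rw [flatten_cons]
      simp only [popDrop]
      split_ifs with h
      · rw [ih]
        rw [List.take_append_of_le_length (by simp; omega)]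
        congr 1
        simp
        omega
      · rw [flatten_cons]
        rw [List.take_append, List.take_of_length_le (by simp; omega)]
        congr 1
        rw [List.take_replicate]
        congr 1
        simp
        omega

-- Python's answer[:-i] for an arbitrary integer i, as a take
theorem sliceStop (xs : List Int) (i : Int) :
    PySem.List.slice xs none (some (-i)) =
      xs.take (if 0 < i then xs.length - i.toNat else min (-i).toNat xs.length) := by
  split_ifs with h
  · obtain ⟨k, rfl⟩ : ∃ k : Nat, i = (k : Int) := ⟨i.toNat, (Int.toNat_of_nonneg (by omega)).symm⟩
    rw [PySem.List.slice_to_neg_natCast xs k (by exact_mod_cast h)]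
    simp
  · rw [PySem.List.slice_to xs (by omega)]
    rw [List.take_eq_take_iff]
    omega

-- Python's [i] * i * 2 as a replicate
theorem pyRepeat_twice (i : Int) :
    PySem.List.pyRepeat (PySem.List.pyRepeat [i] i) 2 = List.replicate (2 * i).toNat i := by
  rw [PySem.List.pyRepeat_singleton]
  have h2 : (2 * i).toNat = i.toNat + i.toNat := by omega
  rw [h2, List.replicate_add]
  simp [PySem.List.pyRepeat]

-- one step of Source B's loop tracks one step of A's loop, and total stays the flat length
theorem step_ok (segs : List (Int × Nat)) (p : Int × Bool) :
    flatten (altStep (segs, (flatten segs).length) p).1 =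
      (if p.2 then flatten segs ++ PySem.List.pyRepeat (PySem.List.pyRepeat [p.1] p.1) 2
       else PySem.List.slice (flatten segs) none (some (-p.1))) ∧
    (altStep (segs, (flatten segs).length) p).2 =
      (flatten (altStep (segs, (flatten segs).length) p).1).length := by
  obtain ⟨v, f⟩ := p
  cases f with
  | true =>
    simp only [altStep, if_true]
    simp only [pyRepeat_twice]
    split_ifs with h
    · constructor
      · rw [flatten_cons]
      · rw [flatten_cons]; simp
    · have : (2 * v).toNat = 0 := by omega
      simp [this]
  | false =>
    simp only [altStep, Bool.false_eq_true, if_false]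
    rw [sliceStop]
    set keep : Nat := if 0 < v then (flatten segs).length - v.toNat
                      else min (-v).toNat (flatten segs).length with hkeep
    have hle : keep ≤ (flatten segs).length := by
      rw [hkeep]; split_ifs <;> omega
    constructor
    · rw [popDrop_flatten]
      congr 1
      omega
    · rw [popDrop_flatten]
      simp
      omega

-- the main loop invariant
theorem loop_inv (l : List (Int × Bool)) : ∀ (segs : List (Int × Nat)),
    flatten (l.foldl altStep (segs, (flatten segs).length)).1 =
      l.foldl
        (fun answer p =>
          if p.2 then answer ++ PySem.List.pyRepeat (PySem.List.pyRepeat [p.1] p.1) 2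
          else PySem.List.slice answer none (some (-p.1)))
        (flatten segs) ∧
    (l.foldl altStep (segs, (flatten segs).length)).2 =
      (flatten (l.foldl altStep (segs, (flatten segs).length)).1).length := by
  induction l with
  | nil => intro segs; exact ⟨rfl, rfl⟩
  | cons p t ih =>
    intro segs
    obtain ⟨h1, h2⟩ := step_ok segs p
    simp only [List.foldl_cons]
    have hst : altStep (segs, (flatten segs).length) p =
        ((altStep (segs, (flatten segs).length) p).1,
         (flatten (altStep (segs, (flatten segs).length) p).1).length) := by
      rw [← h2]
    rw [hst, ← h1]
    exact ih _

-- materializing the stack is flatten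
theorem materialize_eq (segs : List (Int × Nat)) :
    segs.reverse.foldl (fun out p => out ++ List.replicate p.2 p.1) [] = flatten segs := by
  rw [PySem.List.foldl_append_eq_flatMap]
  rfl

-- ===== VERDICT (by name: the statement is the Claim_ definition above) =====
theorem solution_spec : Claim_equal_solution := by
  intro arr flag _
  unfold Spec_solution solution solution_alt
  have h := (loop_inv (arr.zip flag) []).1
  have h1 : flatten ([] : List (Int × Nat)) = [] := rfl
  have h0 : (flatten ([] : List (Int × Nat))).length = 0 := rfl
  rw [h0, h1] at h
  rw [materialize_eq, h]
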